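-- pv_equiv track=rewrite | github.com/Lucas2012/EGP_V0.2 | tasks/R2R-pano/agents/graph_pano_agent.py | compare_path
-- ===== SOURCE A (Python) =====
-- def compare_path(teacher, path):
--     count = 0
--     min_len = min(len(teacher), len(path))
--     for i in range(min_len):
--         if path[i] == teacher[i]:
--             count += 1
--         else:
--             break
--     return count
-- ===== SOURCE B (Python) =====
-- def compare_path(teacher, path):
--     # Binary search for the largest k such that teacher[:k] == path[:k].
--     # The predicate "prefixes of length k agree" is monotone in k, so
--     # binary search over [0, min(len(teacher), len(path))] finds the
--     # common-prefix length without any element-by-element scan loop.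
--     lo, hi = 0, min(len(teacher), len(path))
--     while lo < hi:
--         mid = (lo + hi + 1) // 2
--         if teacher[:mid] == path[:mid]:
--             lo = mid
--         else:
--             hi = mid - 1
--     return lo
-- ===== Notes on version B (the rewrite author's own statement) =====
-- stated objective: alternative
-- what changed: Replaces A's element-by-element scan with break by a binary search over the monotone predicate 'prefixes of length k are equal', comparing whole slices; no per-element loop or counter remains.
import Mathlib
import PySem

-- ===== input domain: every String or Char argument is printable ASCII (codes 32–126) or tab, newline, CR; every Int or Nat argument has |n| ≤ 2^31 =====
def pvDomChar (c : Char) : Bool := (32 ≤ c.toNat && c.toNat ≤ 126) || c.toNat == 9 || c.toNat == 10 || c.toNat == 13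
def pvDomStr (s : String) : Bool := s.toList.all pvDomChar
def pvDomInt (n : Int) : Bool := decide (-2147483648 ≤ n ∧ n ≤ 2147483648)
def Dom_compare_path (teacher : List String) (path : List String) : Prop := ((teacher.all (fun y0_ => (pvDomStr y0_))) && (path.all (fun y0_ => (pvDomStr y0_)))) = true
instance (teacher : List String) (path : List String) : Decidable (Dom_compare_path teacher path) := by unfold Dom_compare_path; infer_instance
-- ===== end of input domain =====

-- B replaces A's per-element scan by a binary search on the monotone predicate 'prefixes of length k agree' (alternative decomposition, same result).
-- ===== PORT A =====
-- A's 'for i in range(min_len)' loop with break: structural recursion on the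
-- remaining iteration count (fuel = min_len - i), carrying i and count.
def compareLoopA (teacher : List String) (path : List String) :
    Nat → Nat → Int → Int
  | 0, _, count => count
  | fuel + 1, i, count =>
    if PySem.List.pyGet? path (Int.ofNat i) = PySem.List.pyGet? teacher (Int.ofNat i) then
      compareLoopA teacher path fuel (i + 1) (count + 1)
    else count

def compare_path (teacher : List String) (path : List String) : Int :=
  compareLoopA teacher path (min teacher.length path.length) 0 0

-- ===== PORT B =====
-- B's while-loop: binary search on the prefix length; hi - lo shrinks by at
-- least 1 per iteration, so fuel = initial hi - lo suffices (structural
-- recursion on fuel). lo, hi, mid are always nonnegative Python ints, so Nat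
-- is exact; teacher[:mid] with 0 ≤ mid is List.take mid (PySem slice_to_natCast).
def bsearchB (teacher : List String) (path : List String) :
    Nat → Nat → Nat → Nat
  | 0, lo, _ => lo
  | fuel + 1, lo, hi =>
    if lo < hi then
      let mid := (lo + hi + 1) / 2
      if teacher.take mid = path.take mid then
        bsearchB teacher path fuel mid hi
      else
        bsearchB teacher path fuel lo (mid - 1)
    else lo

def compare_path_alt (teacher : List String) (path : List String) : Int :=
  Int.ofNat (bsearchB teacher path (min teacher.length path.length) 0
    (min teacher.length path.length))

-- ===== PRECONDITION & SPEC =====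
def Spec_compare_path (teacher : List String) (path : List String) (out : Int) : Prop := out = compare_path_alt teacher path
instance (teacher : List String) (path : List String) (out : Int) : Decidable (Spec_compare_path teacher path out) := by unfold Spec_compare_path; infer_instance

-- ===== CLAIM (what is proved, stated in full; the proofs are below) =====
def Claim_equal_compare_path : Prop := ∀ (teacher : List String) (path : List String), Dom_compare_path teacher path → Spec_compare_path teacher path (compare_path teacher path)

-- ===== LEMMAS AND PROOFS =====

-- the common-prefix length both programs compute
def cpl (teacher path : List String) : Nat :=
  ((List.zip teacher path).takeWhile (fun tp => tp.1 == tp.2)).length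

theorem cpl_le (teacher path : List String) :
    cpl teacher path ≤ min teacher.length path.length := by
  unfold cpl
  calc ((List.zip teacher path).takeWhile (fun tp => tp.1 == tp.2)).length
      ≤ (List.zip teacher path).length := (List.takeWhile_prefix _).length_le
    _ = min teacher.length path.length := List.length_zip

-- loop invariant for A: with fuel = min_len - i, the loop adds the
-- takewhile-length of the dropped zip
theorem loopA_eq (teacher path : List String) :
    ∀ (fuel i : Nat) (count : Int), i + fuel = min teacher.length path.length →
    compareLoopA teacher path fuel i count
      = count + Int.ofNat (((List.zip teacher path).drop i).takeWhile
          (fun tp => tp.1 == tp.2)).length := by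
  intro fuel
  induction fuel with
  | zero =>
    intro i count h
    have : (List.zip teacher path).drop i = [] := by
      apply List.drop_eq_nil_of_le; rw [List.length_zip]; omega
    simp [compareLoopA, this]
  | succ n ih =>
    intro i count h
    have ht : i < teacher.length := by omega
    have hp : i < path.length := by omega
    have hz : i < (List.zip teacher path).length := by
      rw [List.length_zip]; omega
    have hdrop : (List.zip teacher path).drop i
        = (teacher[i], path[i]) :: (List.zip teacher path).drop (i + 1) := by
      rw [List.drop_eq_getElem_cons hz]; simp
    rw [compareLoopA]
    simp only [Int.ofNat_eq_natCast, PySem.List.pyGet?_natCast]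
    rw [List.getElem?_eq_getElem ht, List.getElem?_eq_getElem hp]
    by_cases he : path[i] = teacher[i]
    · simp only [he, if_true]
      rw [ih (i + 1) (count + 1) (by omega), hdrop]
      simp [List.takeWhile, he]
      ring
    · have hne : ¬ (some path[i] = some teacher[i]) := by
        intro h'; exact he (Option.some.inj h')
      rw [if_neg hne, hdrop]
      have : (teacher[i] == path[i]) = false := by
        rw [beq_eq_false_iff_ne]; exact fun h' => he h'.symm
      simp [List.takeWhile, this]

-- prefixes of length k agree iff k is at most the common-prefix length
theorem take_eq_iff (teacher path : List String) (k : Nat)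
    (hk : k ≤ min teacher.length path.length) :
    (teacher.take k = path.take k) ↔ k ≤ cpl teacher path := by
  induction teacher generalizing path k with
  | nil => simp at hk; simp [hk]
  | cons t ts ih =>
    cases path with
    | nil => simp at hk; simp [hk]
    | cons p ps =>
      cases k with
      | zero => simp [cpl]
      | succ k =>
        simp only [List.length_cons] at hk
        have hk' : k ≤ min ts.length ps.length := by omega
        by_cases he : t = p
        · have hc : cpl (t :: ts) (p :: ps) = cpl ts ps + 1 := by
            simp [cpl, he]
          rw [hc]
          simp only [List.take_succ_cons, List.cons.injEq]
          rw [ih ps k hk']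
          constructor
          · rintro ⟨_, h2⟩; omega
          · intro h; exact ⟨he, by omega⟩
        · have hb : (t == p) = false := by rw [beq_eq_false_iff_ne]; exact he
          have hc : cpl (t :: ts) (p :: ps) = 0 := by
            simp [cpl, hb]
          rw [hc]
          simp only [List.take_succ_cons, List.cons.injEq]
          constructor
          · rintro ⟨h1, _⟩; exact absurd h1 he
          · omega

-- binary search converges to the common-prefix length given enough fuel
theorem bsearchB_eq (teacher path : List String) :
    ∀ fuel lo hi, hi - lo ≤ fuel → lo ≤ cpl teacher path → cpl teacher path ≤ hi →
      hi ≤ min teacher.length path.length →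
      bsearchB teacher path fuel lo hi = cpl teacher path := by
  intro fuel
  induction fuel with
  | zero =>
    intro lo hi h1 h2 h3 _
    rw [bsearchB]; omega
  | succ n ih =>
    intro lo hi h1 h2 h3 hm
    rw [bsearchB]
    by_cases h : lo < hi
    · rw [if_pos h]
      have hmid1 : lo < (lo + hi + 1) / 2 := by omega
      have hmid2 : (lo + hi + 1) / 2 ≤ hi := by omega
      by_cases heq : teacher.take ((lo + hi + 1) / 2) = path.take ((lo + hi + 1) / 2)
      · rw [if_pos heq]
        have := (take_eq_iff teacher path _ (by omega)).mp heq
        exact ih _ _ (by omega) this h3 hm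
      · rw [if_neg heq]
        have := (take_eq_iff teacher path _ (by omega)).not.mp heq
        exact ih _ _ (by omega) h2 (by omega) (by omega)
    · rw [if_neg h]; omega

-- ===== VERDICT (by name: the statement is the Claim_ definition above) =====
theorem compare_path_spec : Claim_equal_compare_path := by
  intro teacher path _
  unfold Spec_compare_path compare_path compare_path_alt
  rw [loopA_eq teacher path (min teacher.length path.length) 0 0 (by omega),
      bsearchB_eq teacher path (min teacher.length path.length) 0
        (min teacher.length path.length) (by omega) (Nat.zero_le _) (cpl_le teacher path) le_rfl]
  simp [cpl]
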